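-- pv_equiv track=rewrite | github.com/geoparquet/geoparquet-io | geoparquet_io/core/common.py | is_remote_url
-- ===== SOURCE A (Python) =====
-- def is_remote_url(path):
--     """
--     Check if path is a remote URL that DuckDB can read.
--
--     Supports:
--     - HTTP/HTTPS: http://, https://
--     - AWS S3: s3://, s3a://
--     - Azure: az://, azure://, abfs://, abfss://
--     - Google Cloud Storage: gs://, gcs://
--
--     Args:
--         path: File path or URL to check
--
--     Returns:
--         bool: True if path is a remote URL, False otherwise
--     """
--     remote_schemes = [
--         "http://",
--         "https://",
--         "s3://",
--         "s3a://",
--         "gs://",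
--         "gcs://",
--         "az://",
--         "azure://",
--         "abfs://",
--         "abfss://",
--     ]
--     return any(path.startswith(scheme) for scheme in remote_schemes)
-- ===== SOURCE B (Python) =====
-- _SCHEMES = ("http", "https", "s3", "s3a", "gs", "gcs", "az", "azure", "abfs", "abfss")
--
--
-- def is_remote_url(path):
--     """Check if path is a remote URL that DuckDB can read."""
--     i = 0
--     n = len(path)
--     while i < n and path[i] != ':':
--         i += 1
--     return path[i:i + 3] == '://' and path[:i] in _SCHEMES
-- ===== Notes on version B (the rewrite author's own statement) =====
-- stated objective: alternative
-- what changed: Instead of testing the path against ten full scheme prefixes with startswith, B scans once to the first ':' with an index loop, checks that the three characters there are '://', and looks the bare scheme name up in a tuple of scheme names.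
import Mathlib
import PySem

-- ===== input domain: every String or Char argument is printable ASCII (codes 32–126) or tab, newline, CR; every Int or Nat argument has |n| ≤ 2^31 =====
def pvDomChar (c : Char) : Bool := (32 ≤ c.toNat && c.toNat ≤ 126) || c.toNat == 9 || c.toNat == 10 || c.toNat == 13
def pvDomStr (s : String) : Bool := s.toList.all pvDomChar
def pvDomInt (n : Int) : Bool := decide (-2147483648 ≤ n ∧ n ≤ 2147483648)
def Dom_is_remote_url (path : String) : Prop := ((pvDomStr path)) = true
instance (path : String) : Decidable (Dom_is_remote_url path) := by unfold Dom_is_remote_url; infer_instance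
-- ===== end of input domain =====

-- B scans once to the first ':' with an index loop, checks the three characters there are
-- "://", and looks the bare scheme name up, instead of A's ten startswith prefix tests
-- (alternative decomposition, same cost class).

-- ===== PORT A =====
def is_remote_url (path : String) : Bool :=
  let remote_schemes : List String :=
    ["http://", "https://", "s3://", "s3a://", "gs://", "gcs://",
     "az://", "azure://", "abfs://", "abfss://"]
  remote_schemes.any (fun scheme => PySem.Str.startswith path scheme)

-- ===== PORT B =====
-- B's while loop 'i = 0; while i < n and path[i] != ":": i += 1' is the structural
-- recursion pvScanColon over the character list (exact: i counts the characters consumed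
-- before the first ':', or n if none).
def pvScanColon : List Char → Nat
  | [] => 0
  | c :: cs => if c = ':' then 0 else pvScanColon cs + 1

-- The slices path[i:i+3] and path[:i] with 0 ≤ i ≤ n are exactly (drop i).take 3 and take i.
def is_remote_url_alt (path : String) : Bool :=
  let l := path.toList
  let i := pvScanColon l
  decide ((l.drop i).take 3 = [':', '/', '/']) &&
    (["http", "https", "s3", "s3a", "gs", "gcs", "az", "azure", "abfs",
      "abfss"] : List String).contains (String.ofList (l.take i))

-- ===== PRECONDITION & SPEC =====
def Spec_is_remote_url (path : String) (out : Bool) : Prop := out = is_remote_url_alt path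
instance (path : String) (out : Bool) : Decidable (Spec_is_remote_url path out) := by unfold Spec_is_remote_url; infer_instance

-- ===== CLAIM (what is proved, stated in full; the proofs are below) =====
def Claim_equal_is_remote_url : Prop := ∀ (path : String), Dom_is_remote_url path → Spec_is_remote_url path (is_remote_url path)

-- ===== LEMMAS AND PROOFS =====

-- The scan stops exactly at the first ':'.
theorem pvScanColon_append (w : List Char) (hw : (':' : Char) ∉ w) (t : List Char) :
    pvScanColon (w ++ ':' :: t) = w.length := by
  induction w with
  | nil => simp [pvScanColon]
  | cons c cs ih =>
    simp only [List.mem_cons, not_or] at hw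
    simp [pvScanColon, Ne.symm hw.1, ih hw.2]

-- Forward: a startswith hit for the full scheme w ++ "://" (w colon-free) makes B true.
theorem pv_fwd (path : String) (w : List Char) (hw : (':' : Char) ∉ w)
    (hpre : (w ++ [':', '/', '/']) <+: path.toList)
    (hmem : (["http", "https", "s3", "s3a", "gs", "gcs", "az", "azure", "abfs",
      "abfss"] : List String).contains (String.ofList w) = true) :
    is_remote_url_alt path = true := by
  obtain ⟨rest, hT⟩ := hpre
  have hT' : path.toList = w ++ ':' :: '/' :: '/' :: rest := by
    rw [← hT]; simp
  simp only [is_remote_url_alt, hT', pvScanColon_append w hw]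
  rw [List.drop_left, List.take_left]
  simpa using hmem

-- Backward: if B's slice check at i succeeds, the prefix up to i extended by "://" is a
-- prefix of the path.
theorem pv_bwd (path : String) (i : Nat)
    (h1 : (path.toList.drop i).take 3 = [':', '/', '/']) :
    (path.toList.take i ++ [':', '/', '/']) <+: path.toList := by
  refine ⟨(path.toList.drop i).drop 3, ?_⟩
  rw [List.append_assoc, ← h1, List.take_append_drop, List.take_append_drop]

theorem pv_case (path full : String) (w : List Char)
    (hfull : full.toList = w ++ [':', '/', '/'])
    (htake : path.toList.take (pvScanColon path.toList) = w)
    (h1 : (path.toList.drop (pvScanColon path.toList)).take 3 = [':', '/', '/']) :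
    PySem.Chars.startswith path.toList full.toList = true := by
  apply (PySem.Chars.startswith_iff _ _).mpr
  rw [hfull, ← htake]
  exact pv_bwd path _ h1

theorem pv_eq (path : String) : is_remote_url path = is_remote_url_alt path := by
  rw [Bool.eq_iff_iff]
  constructor
  · intro hA
    simp only [is_remote_url, List.any_eq_true, PySem.Str.startswith_eq] at hA
    obtain ⟨s, hs, hsw⟩ := hA
    have hpre := (PySem.Chars.startswith_iff _ _).mp hsw
    fin_cases hs
    · exact pv_fwd path "http".toList (by decide) (by simpa using hpre) (by decide)
    · exact pv_fwd path "https".toList (by decide) (by simpa using hpre) (by decide)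
    · exact pv_fwd path "s3".toList (by decide) (by simpa using hpre) (by decide)
    · exact pv_fwd path "s3a".toList (by decide) (by simpa using hpre) (by decide)
    · exact pv_fwd path "gs".toList (by decide) (by simpa using hpre) (by decide)
    · exact pv_fwd path "gcs".toList (by decide) (by simpa using hpre) (by decide)
    · exact pv_fwd path "az".toList (by decide) (by simpa using hpre) (by decide)
    · exact pv_fwd path "azure".toList (by decide) (by simpa using hpre) (by decide)
    · exact pv_fwd path "abfs".toList (by decide) (by simpa using hpre) (by decide)
    · exact pv_fwd path "abfss".toList (by decide) (by simpa using hpre) (by decide)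
  · intro hB
    simp only [is_remote_url_alt, Bool.and_eq_true, decide_eq_true_eq] at hB
    obtain ⟨h1, h2⟩ := hB
    have hmem := List.contains_iff_mem.mp h2
    simp only [is_remote_url, List.any_eq_true, PySem.Str.startswith_eq]
    simp only [List.mem_cons, List.not_mem_nil, or_false] at hmem
    rcases hmem with h | h | h | h | h | h | h | h | h | h
    all_goals have htake := by simpa using congrArg String.toList h
    · exact ⟨"http://", by simp, pv_case path "http://" _ (by decide) htake h1⟩
    · exact ⟨"https://", by simp, pv_case path "https://" _ (by decide) htake h1⟩
    · exact ⟨"s3://", by simp, pv_case path "s3://" _ (by decide) htake h1⟩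
    · exact ⟨"s3a://", by simp, pv_case path "s3a://" _ (by decide) htake h1⟩
    · exact ⟨"gs://", by simp, pv_case path "gs://" _ (by decide) htake h1⟩
    · exact ⟨"gcs://", by simp, pv_case path "gcs://" _ (by decide) htake h1⟩
    · exact ⟨"az://", by simp, pv_case path "az://" _ (by decide) htake h1⟩
    · exact ⟨"azure://", by simp, pv_case path "azure://" _ (by decide) htake h1⟩
    · exact ⟨"abfs://", by simp, pv_case path "abfs://" _ (by decide) htake h1⟩
    · exact ⟨"abfss://", by simp, pv_case path "abfss://" _ (by decide) htake h1⟩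

-- ===== VERDICT (by name: the statement is the Claim_ definition above) =====
theorem is_remote_url_spec : Claim_equal_is_remote_url := by
  intro path _
  unfold Spec_is_remote_url
  exact pv_eq path
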